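-- pv_equiv track=rewrite | github.com/zhebinliu/knowledge-base | backend/agents/converter_agent.py | _xlsx_raw_to_markdown
-- ===== SOURCE A (Python) =====
-- def _xlsx_raw_to_markdown(raw_text: str, doc_title: str) -> str:
--     """xlsx/csv 抽取出来的原始文本本身已结构化（[Sheet:xx] + " | " 分隔的行），
--     转 markdown 不需要 LLM 重新理解，纯本地处理：
--       - [Sheet: xx] -> ## xx
--       - 每个 sheet 第一行作为表头，紧跟 | --- | 分隔行
--       - 数据行用 markdown table 格式 | a | b | c |
--       - cell 内换行替换为 <br>
--     """
--     out: list[str] = [f"# {doc_title}", ""]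
--     lines = [ln for ln in raw_text.split("\n") if ln.strip()]
--     in_table = False
--     is_first_row = True
--     col_count = 0
--
--     def _normalize_row(line: str) -> tuple[str, int]:
--         cells = [c.strip().replace("\n", "<br>") for c in line.split(" | ")]
--         return "| " + " | ".join(cells) + " |", len(cells)
--
--     for ln in lines:
--         if ln.startswith("[Sheet: ") and ln.endswith("]"):
--             sheet_name = ln[len("[Sheet: "):-1].strip()
--             out.append("")
--             out.append(f"## Sheet：{sheet_name}")
--             out.append("")
--             in_table = False
--             is_first_row = True
--             continue
--
--         # 普通文本行（无 ` | `）
--         if " | " not in ln: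
--             # 收尾上一段表格
--             if in_table:
--                 out.append("")
--                 in_table = False
--                 is_first_row = True
--             out.append(ln)
--             continue
--
--         # 表格行
--         row_md, cnt = _normalize_row(ln)
--         if is_first_row or cnt != col_count:
--             # 起新表 / 列数变化时另起一表
--             if in_table and not is_first_row:
--                 out.append("")
--             out.append(row_md)
--             out.append("| " + " | ".join(["---"] * cnt) + " |")
--             col_count = cnt
--             in_table = True
--             is_first_row = False
--         else:
--             out.append(row_md)
--
--     return "\n".join(out).strip() + "\n"
-- ===== SOURCE B (Python) =====
-- def _xlsx_raw_to_markdown(raw_text: str, doc_title: str) -> str: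
--     # Two-phase: scan lines once into typed segments, then render the segments.
--     lines = [ln for ln in raw_text.split("\n") if ln.strip()]
--
--     segs = []          # ("header", name) | ("text", line) | ("run", col_count, rows)
--     cur = None         # open table run: (col_count, rows)
--     for ln in lines:
--         if ln.startswith("[Sheet: ") and ln.endswith("]"):
--             if cur:
--                 segs.append(("run",) + cur)
--                 cur = None
--             segs.append(("header", ln[len("[Sheet: "):-1].strip()))
--         elif " | " not in ln:
--             if cur:
--                 segs.append(("run",) + cur)
--                 cur = None
--             segs.append(("text", ln))
--         else:
--             cells = [c.strip().replace("\n", "<br>") for c in ln.split(" | ")]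
--             row = "| " + " | ".join(cells) + " |"
--             if cur and cur[0] == len(cells):
--                 cur[1].append(row)
--             else:
--                 if cur:
--                     segs.append(("run",) + cur)
--                 cur = (len(cells), [row])
--     if cur:
--         segs.append(("run",) + cur)
--
--     out = ["# " + doc_title, ""]
--     prev_run = False
--     for seg in segs:
--         if seg[0] == "header":
--             out += ["", "## Sheet：" + seg[1], ""]
--             prev_run = False
--         elif seg[0] == "text":
--             if prev_run:
--                 out.append("")
--             out.append(seg[1])
--             prev_run = False
--         else:
--             _, cnt, rows = seg
--             if prev_run:
--                 out.append("")
--             out.append(rows[0])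
--             out.append("| " + " | ".join(["---"] * cnt) + " |")
--             out += rows[1:]
--             prev_run = True
--     return "\n".join(out).strip() + "\n"
-- ===== Notes on version B (the rewrite author's own statement) =====
-- stated objective: alternative
-- what changed: A renders markdown in one pass over the lines with in_table/is_first_row/col_count flag state; B first parses the lines into typed segments (sheet headers, text lines, table runs grouped by column count) and then renders the segment list in a separate pass.
import Mathlib
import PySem

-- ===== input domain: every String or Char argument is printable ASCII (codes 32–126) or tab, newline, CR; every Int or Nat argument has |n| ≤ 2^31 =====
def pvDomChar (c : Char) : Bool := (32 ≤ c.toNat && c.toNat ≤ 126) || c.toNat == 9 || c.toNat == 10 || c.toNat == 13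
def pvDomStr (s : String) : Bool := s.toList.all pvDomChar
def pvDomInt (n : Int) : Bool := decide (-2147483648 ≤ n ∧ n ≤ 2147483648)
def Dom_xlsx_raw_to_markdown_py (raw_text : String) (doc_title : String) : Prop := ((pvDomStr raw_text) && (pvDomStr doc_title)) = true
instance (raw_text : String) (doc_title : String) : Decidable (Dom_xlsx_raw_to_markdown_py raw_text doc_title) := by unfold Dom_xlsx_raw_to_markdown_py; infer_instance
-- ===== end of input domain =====

-- B replaces A's one-pass flag machine by a parse-into-segments / render-segments two-phase pass (alternative decomposition, same cost).

-- ===== PORT A =====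
-- shared small helpers (both Pythons contain these very expressions)
def pvNormRow (line : String) : String × Int :=
  let cells := (((PySem.Str.split? line " | ").getD [])).map (fun c => PySem.Str.replace (PySem.Str.strip c) "\n" "<br>")
  ("| " ++ PySem.Str.join " | " cells ++ " |", (cells.length : Int))

def pvSepRow (cnt : Int) : String :=
  "| " ++ PySem.Str.join " | " (PySem.List.pyRepeat ["---"] cnt) ++ " |"

def pvIsSheet (ln : String) : Bool :=
  PySem.Str.startswith ln "[Sheet: " && PySem.Str.endswith ln "]"

def pvIsTable (ln : String) : Bool := PySem.Str.isIn " | " ln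

def pvSheetName (ln : String) : String :=
  PySem.Str.strip (PySem.Str.slice ln (some 8) (some (-1)))

-- A's loop body over state (out, in_table, is_first_row, col_count)
def pvStepA (st : List String × Bool × Bool × Int) (ln : String) : List String × Bool × Bool × Int :=
  match st with
  | (out, in_table, is_first_row, col_count) =>
    if pvIsSheet ln then
      (out ++ ["", "## Sheet：" ++ pvSheetName ln, ""], false, true, col_count)
    else if !(pvIsTable ln) then
      if in_table then (out ++ ["", ln], false, true, col_count)
      else (out ++ [ln], in_table, is_first_row, col_count)
    else
      let (row_md, cnt) := pvNormRow ln
      if is_first_row || cnt != col_count then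
        ((if in_table && !is_first_row then out ++ [""] else out) ++ [row_md, pvSepRow cnt],
          true, false, cnt)
      else
        (out ++ [row_md], in_table, is_first_row, col_count)

def xlsx_raw_to_markdown_py (raw_text : String) (doc_title : String) : String :=
  let lines := ((PySem.Str.split? raw_text "\n").getD []).filter (fun ln => !(PySem.Str.strip ln == ""))
  let st := lines.foldl pvStepA (["# " ++ doc_title, ""], false, true, 0)
  PySem.Str.strip (PySem.Str.join "\n" st.1) ++ "\n"

-- ===== PORT B =====
inductive PvSeg
  | header : String → PvSeg
  | text : String → PvSeg
  | run : Int → List String → PvSeg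
deriving DecidableEq, Repr

-- 'if cur: segs.append(("run",)+cur)'
def pvFlush (st : List PvSeg × Option (Int × List String)) : List PvSeg :=
  match st.2 with
  | some (c, rows) => st.1 ++ [PvSeg.run c rows]
  | none => st.1

-- phase-1 loop body: state (segs, cur)
def pvStepB (st : List PvSeg × Option (Int × List String)) (ln : String) :
    List PvSeg × Option (Int × List String) :=
  if pvIsSheet ln then
    (pvFlush st ++ [PvSeg.header (pvSheetName ln)], none)
  else if !(pvIsTable ln) then
    (pvFlush st ++ [PvSeg.text ln], none)
  else
    let (row, cnt) := pvNormRow ln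
    match st.2 with
    | some (c, rows) =>
      if c == cnt then (st.1, some (c, rows ++ [row]))
      else (st.1 ++ [PvSeg.run c rows], some (cnt, [row]))
    | none => (st.1, some (cnt, [row]))

-- phase-2 loop body: state (out, prev_run); rows of a run are nonempty by construction,
-- so 'rows[0]' is ported as headD "" (never the default on reachable inputs)
def pvRenderStep (st : List String × Bool) (seg : PvSeg) : List String × Bool :=
  match seg with
  | PvSeg.header name => (st.1 ++ ["", "## Sheet：" ++ name, ""], false)
  | PvSeg.text ln => ((if st.2 then st.1 ++ [""] else st.1) ++ [ln], false)
  | PvSeg.run cnt rows =>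
      ((if st.2 then st.1 ++ [""] else st.1) ++ [rows.headD "", pvSepRow cnt] ++ rows.tail, true)

def xlsx_raw_to_markdown_py_alt (raw_text : String) (doc_title : String) : String :=
  let lines := ((PySem.Str.split? raw_text "\n").getD []).filter (fun ln => !(PySem.Str.strip ln == ""))
  let segs := pvFlush (lines.foldl pvStepB ([], none))
  let out := (segs.foldl pvRenderStep (["# " ++ doc_title, ""], false)).1
  PySem.Str.strip (PySem.Str.join "\n" out) ++ "\n"

-- ===== PRECONDITION & SPEC =====
def Spec_xlsx_raw_to_markdown_py (raw_text : String) (doc_title : String) (out : String) : Prop := out = xlsx_raw_to_markdown_py_alt raw_text doc_title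
instance (raw_text : String) (doc_title : String) (out : String) : Decidable (Spec_xlsx_raw_to_markdown_py raw_text doc_title out) := by unfold Spec_xlsx_raw_to_markdown_py; infer_instance

-- ===== CLAIM (what is proved, stated in full; the proofs are below) =====
def Claim_equal_xlsx_raw_to_markdown_py : Prop := ∀ (raw_text : String) (doc_title : String), Dom_xlsx_raw_to_markdown_py raw_text doc_title → Spec_xlsx_raw_to_markdown_py raw_text doc_title (xlsx_raw_to_markdown_py raw_text doc_title)

-- ===== LEMMAS AND PROOFS =====

-- reference emission: what both programs append for the remaining lines, given the
-- abstracted table state (none = not in a table, some cc = in a table of cc columns)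
def pvEmit : List String → Option Int → List String
  | [], _ => []
  | ln :: rest, cur =>
    if pvIsSheet ln then
      ["", "## Sheet：" ++ pvSheetName ln, ""] ++ pvEmit rest none
    else if !(pvIsTable ln) then
      (if cur.isSome then [""] else []) ++ [ln] ++ pvEmit rest none
    else
      let (row, cnt) := pvNormRow ln
      match cur with
      | some c =>
        if c == cnt then row :: pvEmit rest (some c)
        else ["", row, pvSepRow cnt] ++ pvEmit rest (some cnt)
      | none => [row, pvSepRow cnt] ++ pvEmit rest (some cnt)

theorem pvA_emit (lines : List String) :
    ∀ (out : List String) (inTab : Bool) (cc : Int),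
      (lines.foldl pvStepA (out, inTab, !inTab, cc)).1
        = out ++ pvEmit lines (if inTab then some cc else none) := by
  induction lines with
  | nil => intro out inTab cc; simp [pvEmit]
  | cons ln rest ih =>
    intro out inTab cc
    by_cases hs : pvIsSheet ln = true
    · simp [List.foldl_cons, pvStepA, pvEmit, hs]
      have := ih (out ++ ["", "## Sheet：" ++ pvSheetName ln, ""]) false cc
      simpa using this
    · by_cases hp : pvIsTable ln = true
      · rcases hr : pvNormRow ln with ⟨row, cnt⟩
        cases inTab with
        | false =>
          simp [List.foldl_cons, pvStepA, pvEmit, hs, hp, hr]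
          have := ih (out ++ [row, pvSepRow cnt]) true cnt
          simpa using this
        | true =>
          by_cases hc : cc = cnt
          · subst hc
            simp [List.foldl_cons, pvStepA, pvEmit, hs, hp, hr]
            have := ih (out ++ [row]) true cc
            simpa using this
          · have hcb : (cnt != cc) = true := by simp [bne]; exact fun h => hc h.symm
            simp [List.foldl_cons, pvStepA, pvEmit, hs, hp, hr, hcb, hc]
            have := ih (out ++ [""] ++ [row, pvSepRow cnt]) true cnt
            simpa using this
      · cases inTab with
        | false =>
          simp [List.foldl_cons, pvStepA, pvEmit, hs, hp]
          have := ih (out ++ [ln]) false cc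
          simpa using this
        | true =>
          simp [List.foldl_cons, pvStepA, pvEmit, hs, hp]
          have := ih (out ++ ["", ln]) false cc
          simpa using this

-- whether the last segment is a table run (= the prev_run flag after rendering)
def pvLastRun (segs : List PvSeg) : Bool :=
  match segs.getLast? with
  | some (PvSeg.run _ _) => true
  | _ => false

theorem pvRender_snd (segs : List PvSeg) :
    ∀ st : List String × Bool,
      (segs.foldl pvRenderStep st).2 = (match segs.getLast? with
        | none => st.2
        | some (PvSeg.run _ _) => true
        | some _ => false) := by
  induction segs with
  | nil => intro st; simp
  | cons s rest ih =>
    intro st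
    cases rest with
    | nil => cases s <;> simp [pvRenderStep]
    | cons b l =>
      rw [List.foldl_cons, ih]
      rcases h : (b :: l).getLast? with _ | s'
      · simp at h
      · cases s' <;> simp [h]

-- invariant of phase-1 states: an open run has rows, and with no open run the last
-- flushed segment is not a run
def pvInv (st : List PvSeg × Option (Int × List String)) : Prop :=
  match st.2 with
  | some (_, rows) => rows ≠ []
  | none => pvLastRun st.1 = false

def pvR (st : List PvSeg × Option (Int × List String)) (out0 : List String) : List String :=
  ((pvFlush st).foldl pvRenderStep (out0, false)).1

theorem pvB_emit (lines : List String) :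
    ∀ (st : List PvSeg × Option (Int × List String)) (out0 : List String), pvInv st →
      pvR (lines.foldl pvStepB st) out0
        = pvR st out0 ++ pvEmit lines (st.2.map Prod.fst) := by
  induction lines with
  | nil => intro st out0 _; simp [pvEmit]
  | cons ln rest ih =>
    intro st out0 hinv
    rcases st with ⟨segs, cur⟩
    have hsnd0 : ∀ (L : List PvSeg) (o : List String), pvLastRun L = false →
        ((L.foldl pvRenderStep (o, false)).2) = false := by
      intro L o h
      rw [pvRender_snd]
      unfold pvLastRun at h
      rcases hL : L.getLast? with _ | s
      · simp
      · cases s <;> simp_all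
    by_cases hs : pvIsSheet ln = true
    · -- header line: flush + header segment
      rw [List.foldl_cons]
      have hstep : pvStepB (segs, cur) ln = (pvFlush (segs, cur) ++ [PvSeg.header (pvSheetName ln)], none) := by
        simp [pvStepB, hs]
      rw [hstep, ih _ _ (by simp [pvInv, pvLastRun])]
      have : pvR (pvFlush (segs, cur) ++ [PvSeg.header (pvSheetName ln)], none) out0
          = pvR (segs, cur) out0 ++ ["", "## Sheet：" ++ pvSheetName ln, ""] := by
        simp [pvR, pvFlush, List.foldl_append, pvRenderStep]
      rw [this]
      simp [pvEmit, hs]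
    · by_cases hp : pvIsTable ln = true
      · -- table line
        rcases hr : pvNormRow ln with ⟨row, cnt⟩
        rcases cur with _ | ⟨c, rows⟩
        · -- no open run: start one
          rw [List.foldl_cons]
          have hstep : pvStepB (segs, none) ln = (segs, some (cnt, [row])) := by
            simp [pvStepB, hs, hp, hr]
          rw [hstep, ih _ _ (by simp [pvInv])]
          have hfalse := hsnd0 segs out0 hinv
          have : pvR (segs, some (cnt, [row])) out0 = pvR (segs, none) out0 ++ [row, pvSepRow cnt] := by
            simp [pvR, pvFlush, List.foldl_append, pvRenderStep, hfalse]
          rw [this]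
          simp [pvEmit, hs, hp, hr]
        · by_cases hc : c = cnt
          · -- same column count: extend the run
            subst hc
            rw [List.foldl_cons]
            have hstep : pvStepB (segs, some (c, rows)) ln = (segs, some (c, rows ++ [row])) := by
              simp [pvStepB, hs, hp, hr]
            rw [hstep, ih _ _ (by simp [pvInv])]
            have hrows : rows ≠ [] := hinv
            have : pvR (segs, some (c, rows ++ [row])) out0 = pvR (segs, some (c, rows)) out0 ++ [row] := by
              simp [pvR, pvFlush, List.foldl_append, pvRenderStep]
              constructor
              · cases rows with
                | nil => exact absurd rfl hrows
                | cons a t => simp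
              · exact List.tail_append_singleton_of_ne_nil hrows
            rw [this]
            simp [pvEmit, hs, hp, hr]
          · -- column count changed: flush, start a new run
            rw [List.foldl_cons]
            have hstep : pvStepB (segs, some (c, rows)) ln
                = (segs ++ [PvSeg.run c rows], some (cnt, [row])) := by
              simp [pvStepB, hs, hp, hr, hc]
            rw [hstep, ih _ _ (by simp [pvInv])]
            have : pvR (segs ++ [PvSeg.run c rows], some (cnt, [row])) out0
                = pvR (segs, some (c, rows)) out0 ++ ["", row, pvSepRow cnt] := by
              simp [pvR, pvFlush, List.foldl_append, pvRenderStep]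
            rw [this]
            simp [pvEmit, hs, hp, hr, hc]
      · -- plain text line: flush + text segment
        rw [List.foldl_cons]
        have hstep : pvStepB (segs, cur) ln = (pvFlush (segs, cur) ++ [PvSeg.text ln], none) := by
          simp [pvStepB, hs, hp]
        rw [hstep, ih _ _ (by simp [pvInv, pvLastRun])]
        rcases cur with _ | ⟨c, rows⟩
        · have hfalse := hsnd0 segs out0 hinv
          have : pvR (pvFlush (segs, none) ++ [PvSeg.text ln], none) out0
              = pvR (segs, none) out0 ++ [ln] := by
            simp [pvR, pvFlush, List.foldl_append, pvRenderStep, hfalse]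
          rw [this]
          simp [pvEmit, hs, hp]
        · have : pvR (pvFlush (segs, some (c, rows)) ++ [PvSeg.text ln], none) out0
              = pvR (segs, some (c, rows)) out0 ++ ["", ln] := by
            simp [pvR, pvFlush, List.foldl_append, pvRenderStep]
          rw [this]
          simp [pvEmit, hs, hp]

-- ===== VERDICT (by name: the statement is the Claim_ definition above) =====
theorem xlsx_raw_to_markdown_py_spec : Claim_equal_xlsx_raw_to_markdown_py := by
  intro raw_text doc_title _
  unfold Spec_xlsx_raw_to_markdown_py
  simp only [xlsx_raw_to_markdown_py, xlsx_raw_to_markdown_py_alt]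
  have hA := pvA_emit (((PySem.Str.split? raw_text "\n").getD []).filter (fun ln => !(PySem.Str.strip ln == "")))
    ["# " ++ doc_title, ""] false 0
  have hB := pvB_emit (((PySem.Str.split? raw_text "\n").getD []).filter (fun ln => !(PySem.Str.strip ln == "")))
    ([], none) ["# " ++ doc_title, ""] (by simp [pvInv, pvLastRun])
  simp only [Bool.not_false] at hA
  simp only [pvR] at hB
  rw [hA, hB]
  simp [pvFlush]
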